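-- pv_equiv track=rewrite | github.com/iks124/mammoth | models/tak_utils/templates.py | generate_composite_factors
-- ===== SOURCE A (Python) =====
-- def generate_composite_factors(templates, selected_factors=None):
--     """
--     templates: a dictionary of contextual factors with the following format
--     templates = {
--         "factor_1": {
--             "value_1": ["description_1", "description_2", "description_3"],
--             "value_2": ["description_1", "description_2", "description_3"],
--             }
--         "factor_2": {
--             "value_1": ["description_1", "description_2", "description_3"],
--             "value_2": ["description_1", "description_2", "description_3"],
--             "value_3": ["description_1", "description_2", "description_3"],
--             }
--         }
--     selected_factors: a list of factors that we would like to compose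
--     """
--     # If selected_factors is provided, filter out the keys that are not in the list
--     if selected_factors:
--         templates = {k: templates[k] for k in selected_factors if k in templates}
--
--     # Base case: if the templates dictionary is empty, return a dictionary with a single empty entry
--     if not templates:
--         return {"": [""]}
--
--     # Extract the first key-value pair from the templates dictionary
--     key, sub_dict = next(iter(templates.items()))
--
--     # Create a copy of the templates dictionary without the extracted key
--     rest_templates = {k: v for k, v in templates.items() if k != key}
--
--     composite = {}
--
--     # Iterate over each sub_key and its associated values in the sub_dict
--     for sub_key, values in sub_dict.items():
--         # Recursively generate composite conditions for the rest of the templates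
--         for rest_key, rest_values in generate_composite_factors(rest_templates).items():
--             # Construct the new composite key
--             new_key = f"{sub_key}_{rest_key}" if rest_key else sub_key
--
--             # Combine every value from the current list with every value from the recursive results
--             # Add commas during composition, but ensure we don't add unnecessary commas for empty values
--             combined_values = [v + (", " + rv if rv else "") if v else rv for v in values for rv in rest_values]
--             composite[new_key] = combined_values
--
--     return composite
-- ===== SOURCE B (Python) =====
-- def _join_key(sk, rk):
--     return sk if not rk else sk + "_" + rk
--
--
-- def _join_vals(vals, rvals):
--     out = []
--     for v in vals:
--         out += rvals if not v else [v if not rv else v + ", " + rv for rv in rvals]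
--     return out
--
--
-- def _level_pairs(sub_dict, rest):
--     return [(_join_key(sk, rk), _join_vals(vals, rvals))
--             for sk, vals in sub_dict.items() for rk, rvals in rest.items()]
--
--
-- def generate_composite_factors(templates, selected_factors=None):
--     if selected_factors:
--         templates = {k: templates[k] for k in selected_factors if k in templates}
--     # Iteratively fold the factors right-to-left: each level's composite is
--     # computed exactly once as a flat pair list, then collapsed into a dict.
--     result = {"": [""]}
--     for sub_dict in reversed(list(templates.values())):
--         result = dict(_level_pairs(sub_dict, result))
--     return result
-- ===== Notes on version B (the rewrite author's own statement) =====
-- stated objective: alternative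
-- what changed: B replaces A's recursion, which re-generates the composite of the remaining factors once per value of the current factor, by an iterative right-to-left pass that builds each level once as a flat pair list and collapses it with dict().
import Mathlib
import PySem

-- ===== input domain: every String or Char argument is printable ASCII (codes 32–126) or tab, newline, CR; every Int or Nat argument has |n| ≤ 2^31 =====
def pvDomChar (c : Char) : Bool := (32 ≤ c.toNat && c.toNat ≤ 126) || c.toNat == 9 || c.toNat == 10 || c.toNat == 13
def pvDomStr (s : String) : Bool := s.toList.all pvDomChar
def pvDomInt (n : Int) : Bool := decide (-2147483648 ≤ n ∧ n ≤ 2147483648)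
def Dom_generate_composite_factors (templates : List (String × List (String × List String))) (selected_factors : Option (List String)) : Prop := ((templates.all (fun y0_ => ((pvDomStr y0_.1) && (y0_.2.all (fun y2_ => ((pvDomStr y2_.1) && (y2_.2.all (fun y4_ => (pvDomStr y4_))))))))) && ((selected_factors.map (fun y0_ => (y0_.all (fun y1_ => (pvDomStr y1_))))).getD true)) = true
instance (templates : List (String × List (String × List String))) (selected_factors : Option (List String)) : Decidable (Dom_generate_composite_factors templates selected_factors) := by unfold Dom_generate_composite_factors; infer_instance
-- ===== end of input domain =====

-- B replaces A's recursion (which re-generates the whole composite of the remaining factors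
-- once per value of the current factor) by an iterative right-to-left pass building each
-- level once as a flat pair list and collapsing it into a dict.

-- ===== PORT A =====
-- recursive helper: A's body after the selected_factors filtering (the recursive call
-- passes no selected_factors).  Each sub_key re-runs the recursion on rest, as A does.
def pvArec (L : List (String × List (String × List String))) : PySem.Dict String (List String) :=
  match L with
  | [] => PySem.Dict.mk [("", [""])]
  | (key, sub_dict) :: tail =>
    -- rest_templates = {k: v for k, v in templates.items() if k != key}
    sub_dict.foldl (fun composite p =>
      (pvArec (((key, sub_dict) :: tail).filter (fun q => q.1 != key))).items.foldl
        (fun composite q =>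
          composite.insert (if q.1 != "" then p.1 ++ "_" ++ q.1 else p.1)
            (p.2.flatMap (fun v => q.2.map (fun rv =>
              if v != "" then v ++ (if rv != "" then ", " ++ rv else "") else rv))))
        composite)
      PySem.Dict.empty
termination_by L.length
decreasing_by
  simp only [List.filter_cons, bne_self_eq_false, List.length_cons]
  exact Nat.lt_succ_of_le (List.length_filter_le _ _)

def generate_composite_factors (templates : List (String × List (String × List String))) (selected_factors : Option (List String)) : List (String × List String) :=
  (pvArec (match selected_factors with
    | none => templates
    | some [] => templates
    | some (s :: ss) =>
      -- templates = {k: templates[k] for k in selected_factors if k in templates}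
      ((s :: ss).foldl (fun d k =>
        match (PySem.Dict.mk templates).get? k with
        | some v => d.insert k v
        | none => d) PySem.Dict.empty).items)).items

-- ===== PORT B =====
-- _join_key(sk, rk)
def pvJoinKey (sk rk : String) : String := if rk == "" then sk else sk ++ "_" ++ rk

-- _join_vals(vals, rvals): 'out += rvals if not v else [...]' per v
def pvJoinVals (vals rvals : List String) : List String :=
  vals.foldl (fun out v =>
    out ++ (if v == "" then rvals
            else rvals.map (fun rv => if rv == "" then v else v ++ ", " ++ rv))) []

-- _level_pairs(sub_dict, rest): the flat pair list of one composition level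
def pvLevelPairs (sub_dict rest : List (String × List String)) : List (String × List String) :=
  sub_dict.flatMap (fun p => rest.map (fun q => (pvJoinKey p.1 q.1, pvJoinVals p.2 q.2)))

def generate_composite_factors_alt (templates : List (String × List (String × List String))) (selected_factors : Option (List String)) : List (String × List String) :=
  ((match selected_factors with
    | none => templates
    | some [] => templates
    | some (s :: ss) =>
      ((s :: ss).foldl (fun (d : PySem.Dict String (List (String × List String))) k =>
        match (PySem.Dict.mk templates).get? k with
        | some v => d.insert k v
        | none => d) PySem.Dict.empty).items
  ).reverse.foldl
    -- result = dict(_level_pairs(sub_dict, result)); dict(pairs) = sequential inserts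
    (fun (res : PySem.Dict String (List String)) (p : String × List (String × List String)) =>
      (pvLevelPairs p.2 res.items).foldl
        (fun (d : PySem.Dict String (List String)) (pr : String × List String) =>
          d.insert pr.1 pr.2) PySem.Dict.empty)
    (PySem.Dict.mk [("", [""])])).items

-- ===== PRECONDITION & SPEC =====
-- Pre_ excludes association lists with duplicate top-level factor keys: they represent no
-- Python dict (dict keys are unique), so A's behaviour on them is representation-dependent.
def Pre_generate_composite_factors (templates : List (String × List (String × List String))) (selected_factors : Option (List String)) : Prop :=
  (templates.map Prod.fst).Nodup
instance (templates : List (String × List (String × List String))) (selected_factors : Option (List String)) : Decidable (Pre_generate_composite_factors templates selected_factors) := by unfold Pre_generate_composite_factors; infer_instance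

def pvWitness_generate_composite_factors : (List (String × List (String × List String))) × Option (List String) :=
  ([("a", [("x", ["d1", "d2"]), ("y", [""])]), ("b", [("z", ["e"])])], none)

def Spec_generate_composite_factors (templates : List (String × List (String × List String))) (selected_factors : Option (List String)) (out : List (String × List String)) : Prop := out = generate_composite_factors_alt templates selected_factors
instance (templates : List (String × List (String × List String))) (selected_factors : Option (List String)) (out : List (String × List String)) : Decidable (Spec_generate_composite_factors templates selected_factors out) := by unfold Spec_generate_composite_factors; infer_instance

-- ===== CLAIM (what is proved, stated in full; the proofs are below) =====
def Claim_equal_generate_composite_factors : Prop := ∀ (templates : List (String × List (String × List String))) (selected_factors : Option (List String)), Dom_generate_composite_factors templates selected_factors → Pre_generate_composite_factors templates selected_factors → Spec_generate_composite_factors templates selected_factors (generate_composite_factors templates selected_factors)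

-- ===== LEMMAS AND PROOFS =====

-- the filter in A's recursive step removes exactly the head when the keys are distinct
lemma pv_filter_ne_head (key : String) (sd : List (String × List String))
    (tail : List (String × List (String × List String)))
    (h : key ∉ tail.map Prod.fst) :
    ((key, sd) :: tail).filter (fun q => q.1 != key) = tail := by
  simp only [List.filter_cons, bne_self_eq_false, if_false, Bool.false_eq_true]
  exact List.filter_eq_self.mpr (fun p hp => by
    simp only [bne_iff_ne, ne_eq]
    exact fun e => h (e ▸ List.mem_map_of_mem hp))

-- the conditional-insert filtering loop keeps the dict's keys Nodup
lemma pv_nodup_filterloop (sel : List String)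
    (td : PySem.Dict String (List (String × List String)))
    (d : PySem.Dict String (List (String × List String))) (h : d.keys.Nodup) :
    ((sel.foldl (fun d k =>
        match td.get? k with
        | some v => d.insert k v
        | none => d) d)).keys.Nodup := by
  induction sel generalizing d with
  | nil => exact h
  | cons s ss ih =>
    simp only [List.foldl_cons]
    cases td.get? s with
    | none => exact ih _ h
    | some v => exact ih _ (PySem.Dict.nodup_keys_insert _ _ _ h)

-- A's key expression equals B's pvJoinKey
lemma pv_key_eq (sk rk : String) :
    (if rk != "" then sk ++ "_" ++ rk else sk) = pvJoinKey sk rk := by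
  unfold pvJoinKey
  by_cases h : rk = "" <;> simp [h]

-- accumulating '+=' over a list is flatMap
lemma pv_foldl_append {α β : Type} (l : List α) (f : α → List β) (acc : List β) :
    l.foldl (fun out v => out ++ f v) acc = acc ++ l.flatMap f := by
  induction l generalizing acc with
  | nil => simp
  | cons x t ih => simp [ih, List.append_assoc]

-- A's combined-values comprehension equals B's pvJoinVals
lemma pv_vals_eq (vals rvals : List String) :
    vals.flatMap (fun v => rvals.map (fun rv =>
      if v != "" then v ++ (if rv != "" then ", " ++ rv else "") else rv))
    = pvJoinVals vals rvals := by
  unfold pvJoinVals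
  rw [pv_foldl_append, List.nil_append]
  apply List.flatMap_congr
  intro v _
  by_cases hv : v = ""
  · simp [hv]
  · simp only [bne_iff_ne, ne_eq, hv, not_false_eq_true, if_true, beq_iff_eq]
    apply List.map_congr_left
    intro rv _
    by_cases hr : rv = "" <;> simp [hr, String.append_assoc]

-- one row of A's double loop equals an insert loop over B's mapped pair list
lemma pv_inner_foldl (p : String × List String) (R : List (String × List String))
    (d : PySem.Dict String (List String)) :
    R.foldl (fun composite q =>
      composite.insert (if q.1 != "" then p.1 ++ "_" ++ q.1 else p.1)
        (p.2.flatMap (fun v => q.2.map (fun rv =>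
          if v != "" then v ++ (if rv != "" then ", " ++ rv else "") else rv)))) d
    = (R.map (fun q => (pvJoinKey p.1 q.1, pvJoinVals p.2 q.2))).foldl
        (fun d pr => d.insert pr.1 pr.2) d := by
  induction R generalizing d with
  | nil => rfl
  | cons q s ih =>
    simp only [List.foldl_cons, List.map_cons]
    rw [ih, pv_key_eq, pv_vals_eq]

-- A's double insert loop over (sub_dict × rest) equals one insert loop over B's flat pair list
lemma pv_double_foldl (sd R : List (String × List String)) (d : PySem.Dict String (List String)) :
    sd.foldl (fun composite p =>
      R.foldl (fun composite q =>
        composite.insert (if q.1 != "" then p.1 ++ "_" ++ q.1 else p.1)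
          (p.2.flatMap (fun v => q.2.map (fun rv =>
            if v != "" then v ++ (if rv != "" then ", " ++ rv else "") else rv))))
        composite) d
    = (pvLevelPairs sd R).foldl (fun d pr => d.insert pr.1 pr.2) d := by
  induction sd generalizing d with
  | nil => rfl
  | cons p t ih =>
    simp only [List.foldl_cons, pvLevelPairs, List.flatMap_cons, List.foldl_append]
    rw [pv_inner_foldl, ih]
    rfl

-- the core: A's recursion equals B's reversed-iteration fold, for distinct factor keys
lemma pv_arec_eq_fold (L : List (String × List (String × List String)))
    (h : (L.map Prod.fst).Nodup) :
    pvArec L = L.reverse.foldl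
      (fun (res : PySem.Dict String (List String)) p =>
        (pvLevelPairs p.2 res.items).foldl (fun d pr => d.insert pr.1 pr.2) PySem.Dict.empty)
      (PySem.Dict.mk [("", [""])]) := by
  rw [List.foldl_reverse]
  induction L with
  | nil => rw [pvArec]; rfl
  | cons hd tail ih =>
    obtain ⟨key, sd⟩ := hd
    simp only [List.map_cons, List.nodup_cons] at h
    rw [pvArec, pv_filter_ne_head key sd tail h.1, List.foldr_cons, ← ih h.2,
      pv_double_foldl]

-- ===== VERDICT (by name: the statement is the Claim_ definition above) =====
theorem generate_composite_factors_spec : Claim_equal_generate_composite_factors := by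
  intro templates sf _dom hpre
  unfold Spec_generate_composite_factors generate_composite_factors generate_composite_factors_alt
  match sf with
  | none => rw [pv_arec_eq_fold templates hpre]
  | some [] => rw [pv_arec_eq_fold templates hpre]
  | some (s :: ss) =>
    rw [pv_arec_eq_fold]
    exact pv_nodup_filterloop (s :: ss) _ _ PySem.Dict.nodup_keys_empty
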